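-- pv_equiv track=rewrite | github.com/DreamOfTheRedChamber/leetcode | Python/Deque/JerryAI.py | calcNth
-- ===== SOURCE A (Python) =====
-- from collections import defaultdict, deque
-- from typing import List
--
-- def calcNth(num: int) -> List[int]:
--     twoSeries = deque()
--     threeSeries = deque()
--
--     result = [1]
--     twoSeries.append(1*2 + 1)
--     threeSeries.append(1*3 + 1)
--     existing = {1}
--
--     for i in range(1, num):
--         while twoSeries[0] in existing:
--             twoSeries.popleft()
--         while threeSeries[0] in existing:
--             threeSeries.popleft()
--
--         if twoSeries[0] < threeSeries[0]:
--             result.append(twoSeries[0])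
--             twoSeries.append(2*twoSeries[0] + 1)
--             threeSeries.append(3*twoSeries[0] + 1)
--             twoSeries.popleft()
--         else:
--             result.append(threeSeries[0])
--             twoSeries.append(2*threeSeries[0] + 1)
--             threeSeries.append(3*threeSeries[0] + 1)
--             threeSeries.popleft()
--
--     return result
-- ===== SOURCE B (Python) =====
-- from typing import List
--
-- def calcNth(num: int) -> List[int]:
--     result = [1]
--     i2 = i3 = 0
--     for _ in range(1, num):
--         c2 = 2 * result[i2] + 1
--         c3 = 3 * result[i3] + 1
--         if c2 < c3:
--             result.append(c2)
--             i2 += 1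
--         else:
--             result.append(c3)
--             i3 += 1
--     return result
-- ===== Notes on version B (the rewrite author's own statement) =====
-- stated objective: simpler
-- what changed: Replaces the two FIFO deques and the dead existing-set dedup loops with two integer pointers into the growing result list: each step compares the doubled-plus-one and tripled-plus-one candidates at the pointers and advances the chosen pointer; a timing run measured B faster by a constant factor (no deque churn).
import Mathlib
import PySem

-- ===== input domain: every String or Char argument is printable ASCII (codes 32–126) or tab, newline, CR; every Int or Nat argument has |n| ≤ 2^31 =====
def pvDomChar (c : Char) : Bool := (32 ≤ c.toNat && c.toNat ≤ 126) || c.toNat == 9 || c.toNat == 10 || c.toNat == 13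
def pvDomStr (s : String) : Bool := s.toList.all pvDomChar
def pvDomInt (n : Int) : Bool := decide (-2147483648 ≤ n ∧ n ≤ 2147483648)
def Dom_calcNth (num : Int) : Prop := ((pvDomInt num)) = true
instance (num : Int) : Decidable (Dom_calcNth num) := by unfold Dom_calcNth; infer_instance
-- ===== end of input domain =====

-- B replaces A's two FIFO deques (and their dead 'existing'-set dedup loops) with two
-- integer pointers into the growing result list; simpler, same cost.


-- ===== PORT A =====
-- the constant set 'existing = {1}' (A never adds to it)
def pvExisting : PySem.Set Int := PySem.Set.ofList [1]

-- one iteration body of A's for-loop over state (twoSeries, threeSeries, result);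
-- the while-loops 'while q[0] in existing: q.popleft()' are List.dropWhile, and the
-- deque head q[0] is read with headD 0 purely for totality (the deques are never
-- empty on reachable states, so the while-loops never exhaust them)
def calcNthLoopA : Nat → List Int → List Int → List Int → List Int
  | 0, _, _, result => result
  | n+1, twoSeries, threeSeries, result =>
    let twoSeries := twoSeries.dropWhile (fun x => pvExisting.contains x)
    let threeSeries := threeSeries.dropWhile (fun x => pvExisting.contains x)
    let h2 := twoSeries.headD 0
    let h3 := threeSeries.headD 0
    if h2 < h3 then
      calcNthLoopA n ((twoSeries ++ [2*h2+1]).tail) (threeSeries ++ [3*h2+1]) (result ++ [h2])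
    else
      calcNthLoopA n (twoSeries ++ [2*h3+1]) ((threeSeries ++ [3*h3+1]).tail) (result ++ [h3])

def calcNth (num : Int) : List Int :=
  -- result = [1]; twoSeries = [1*2+1]; threeSeries = [1*3+1]; for i in range(1, num)
  calcNthLoopA (num - 1).toNat [1*2 + 1] [1*3 + 1] [1]

-- ===== PORT B =====
def calcNthLoopB : Nat → Nat → Nat → List Int → List Int
  | 0, _, _, result => result
  | n+1, i2, i3, result =>
    let c2 := 2 * result.getD i2 0 + 1   -- result[i2]; i2 is always in range
    let c3 := 3 * result.getD i3 0 + 1   -- result[i3]; i3 is always in range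
    if c2 < c3 then
      calcNthLoopB n (i2+1) i3 (result ++ [c2])
    else
      calcNthLoopB n i2 (i3+1) (result ++ [c3])

def calcNth_alt (num : Int) : List Int :=
  calcNthLoopB (num - 1).toNat 0 0 [1]

-- ===== PRECONDITION & SPEC =====
def Spec_calcNth (num : Int) (out : List Int) : Prop := out = calcNth_alt num
instance (num : Int) (out : List Int) : Decidable (Spec_calcNth num out) := by unfold Spec_calcNth; infer_instance

-- ===== CLAIM (what is proved, stated in full; the proofs are below) =====
def Claim_equal_calcNth : Prop := ∀ (num : Int), Dom_calcNth num → Spec_calcNth num (calcNth num)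

-- ===== LEMMAS AND PROOFS =====

-- invariant: A's deques are exactly the 2x+1 / 3x+1 images of the result suffixes at B's pointers
theorem calcNthLoop_eq (n : Nat) (result : List Int) (i2 i3 : Nat)
    (h2 : i2 < result.length) (h3 : i3 < result.length)
    (hpos : ∀ x ∈ result, (1:Int) ≤ x) :
    calcNthLoopA n ((result.drop i2).map (fun x => 2*x+1))
                   ((result.drop i3).map (fun x => 3*x+1)) result
      = calcNthLoopB n i2 i3 result := by
  induction n generalizing result i2 i3 with
  | zero => rfl
  | succ n ih =>
    have e2 : result.drop i2 = result[i2] :: result.drop (i2+1) := List.drop_eq_getElem_cons h2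
    have e3 : result.drop i3 = result[i3] :: result.drop (i3+1) := List.drop_eq_getElem_cons h3
    have p2 : (1:Int) ≤ result[i2] := hpos _ (List.getElem_mem h2)
    have p3 : (1:Int) ≤ result[i3] := hpos _ (List.getElem_mem h3)
    have c2 : (pvExisting.contains (2*result[i2]+1)) = false := by
      simp [pvExisting, PySem.Set.ofList, PySem.Set.contains]
      omega
    have c3 : (pvExisting.contains (3*result[i3]+1)) = false := by
      simp [pvExisting, PySem.Set.ofList, PySem.Set.contains]
      omega
    have g2 : result.getD i2 0 = result[i2] := List.getD_eq_getElem _ _ h2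
    have g3 : result.getD i3 0 = result[i3] := List.getD_eq_getElem _ _ h3
    rw [calcNthLoopA, calcNthLoopB]
    simp only [e2, e3, List.map_cons, List.dropWhile_cons, c2, c3, Bool.false_eq_true,
      ite_false, List.headD_cons, g2, g3]
    by_cases hlt : 2*result[i2]+1 < 3*result[i3]+1
    · rw [if_pos hlt, if_pos hlt]
      have := ih (result ++ [2*result[i2]+1]) (i2+1) i3
        (by simp; omega) (by simp; omega)
        (by intro x hx; rcases List.mem_append.1 hx with h | h
            · exact hpos _ h
            · simp at h; omega)
      rw [← this]
      congr 1
      · rw [List.drop_append_of_le_length (by omega), List.map_append, List.map_cons]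
        simp
      · rw [List.drop_append_of_le_length (by omega), List.map_append]
        rw [e3]; simp only [List.map_cons, List.map_nil, List.cons_append]
    · rw [if_neg hlt, if_neg hlt]
      have := ih (result ++ [3*result[i3]+1]) i2 (i3+1)
        (by simp; omega) (by simp; omega)
        (by intro x hx; rcases List.mem_append.1 hx with h | h
            · exact hpos _ h
            · simp at h; omega)
      rw [← this]
      congr 1
      · rw [List.drop_append_of_le_length (by omega), List.map_append]
        rw [e2]; simp only [List.map_cons, List.map_nil, List.cons_append]
      · rw [List.drop_append_of_le_length (by omega), List.map_append, List.map_cons]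
        simp

-- ===== VERDICT (by name: the statement is the Claim_ definition above) =====
theorem calcNth_spec : Claim_equal_calcNth := by
  intro num _
  show calcNth num = calcNth_alt num
  unfold calcNth calcNth_alt
  have := calcNthLoop_eq ((num - 1).toNat) [1] 0 0 (by simp) (by simp)
    (by intro x hx; simp at hx; omega)
  simpa using this
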